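-- pv_equiv track=rewrite | github.com/Omer-Sadeh/translators-vector-distance | src/translation/error_injector.py | _split_punctuation
-- ===== SOURCE A (Python) =====
-- import string
-- from typing import List, Tuple
--
-- def _split_punctuation(word: str) -> Tuple[str, str, str]:
--     """
--     Split word into leading punctuation, core, trailing punctuation.
--
--     Args:
--         word: Input word
--
--     Returns:
--         Tuple of (leading_punct, core_word, trailing_punct)
--     """
--     leading = ''
--     trailing = ''
--
--     start = 0
--     while start < len(word) and word[start] in string.punctuation:
--         leading += word[start]
--         start += 1
--
--     end = len(word)
--     while end > start and word[end - 1] in string.punctuation: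
--         trailing = word[end - 1] + trailing
--         end -= 1
--
--     core = word[start:end]
--
--     return leading, core, trailing
-- ===== SOURCE B (Python) =====
-- import string
--
-- def _split_punctuation(word):
--     stripped = word.lstrip(string.punctuation)
--     leading = word[:len(word) - len(stripped)]
--     core = stripped.rstrip(string.punctuation)
--     trailing = stripped[len(core):]
--     return leading, core, trailing
-- ===== Notes on version B (the rewrite author's own statement) =====
-- stated objective: idiomatic
-- what changed: Replaces the two index-based while-loops that accumulate characters one at a time with a single lstrip/rstrip pass, slicing the three parts out by length.
import Mathlib
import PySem

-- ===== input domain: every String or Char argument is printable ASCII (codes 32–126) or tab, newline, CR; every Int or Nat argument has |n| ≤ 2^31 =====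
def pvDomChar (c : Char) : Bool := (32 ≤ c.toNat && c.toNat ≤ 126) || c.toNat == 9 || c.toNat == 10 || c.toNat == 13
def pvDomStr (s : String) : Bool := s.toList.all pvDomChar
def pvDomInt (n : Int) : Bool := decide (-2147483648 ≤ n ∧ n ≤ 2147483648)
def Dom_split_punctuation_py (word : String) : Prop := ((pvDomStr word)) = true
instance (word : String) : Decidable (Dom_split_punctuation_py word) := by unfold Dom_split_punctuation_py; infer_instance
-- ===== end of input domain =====

-- B replaces A's two char-by-char while-loops by an lstrip/rstrip pass with length slicing (idiomatic, same cost).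

-- string.punctuation, as a list of characters (shared constant of the module)
def pvPunct : List Char := "!\"#$%&'()*+,-./:;<=>?@[\\]^_`{|}~".toList

-- ===== PORT A =====
-- first while-loop: advance `start` while word[start] is punctuation, appending to `leading`
def pvALead (w : List Char) (start : Nat) (acc : List Char) : List Char × Nat :=
  if _h : start < w.length ∧ pvPunct.contains w[start]! then
    pvALead w (start + 1) (acc ++ [w[start]!])
  else (acc, start)
termination_by w.length - start
decreasing_by omega

-- second while-loop: move `e` down while word[e-1] is punctuation, prepending to `trailing`
def pvATrail (w : List Char) (start e : Nat) (acc : List Char) : List Char × Nat :=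
  if _h : start < e ∧ pvPunct.contains w[e-1]! then
    pvATrail w start (e - 1) (w[e-1]! :: acc)
  else (acc, e)
termination_by e
decreasing_by omega

def split_punctuation_py (word : String) : String × String × String :=
  let w := word.toList
  let (leading, start) := pvALead w 0 []
  let (trailing, e) := pvATrail w start w.length []
  let core := (w.take e).drop start    -- word[start:end]
  (String.mk leading, String.mk core, String.mk trailing)

-- ===== PORT B =====
def split_punctuation_py_alt (word : String) : String × String × String :=
  let w := word.toList
  let stripped := w.dropWhile (fun c => pvPunct.contains c)          -- word.lstrip(string.punctuation)
  let leading := w.take (w.length - stripped.length)                  -- word[:len(word)-len(stripped)]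
  let core := stripped.rdropWhile (fun c => pvPunct.contains c)       -- stripped.rstrip(string.punctuation)
  let trailing := stripped.drop core.length                           -- stripped[len(core):]
  (String.mk leading, String.mk core, String.mk trailing)

-- ===== PRECONDITION & SPEC =====
def Spec_split_punctuation_py (word : String) (out : String × String × String) : Prop := out = split_punctuation_py_alt word
instance (word : String) (out : String × String × String) : Decidable (Spec_split_punctuation_py word out) := by unfold Spec_split_punctuation_py; infer_instance

-- ===== CLAIM (what is proved, stated in full; the proofs are below) =====
def Claim_equal_split_punctuation_py : Prop := ∀ (word : String), Dom_split_punctuation_py word → Spec_split_punctuation_py word (split_punctuation_py word)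

-- ===== LEMMAS AND PROOFS =====

theorem pvALead_eq (w : List Char) (fuel : Nat) :
    ∀ start acc, w.length - start ≤ fuel → start ≤ w.length →
      pvALead w start acc =
        (acc ++ (w.drop start).takeWhile (fun c => pvPunct.contains c),
         start + ((w.drop start).takeWhile (fun c => pvPunct.contains c)).length) := by
  induction fuel with
  | zero =>
    intro start acc hf hle
    have hs : start = w.length := by omega
    rw [pvALead]
    simp [hs]
  | succ n ih =>
    intro start acc hf hle
    rw [pvALead]
    by_cases hlt : start < w.length
    · have hget : w[start]! = w[start]'hlt := by
        rw [List.getElem!_eq_getElem?_getD]; simp [hlt]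
      have hdrop : w.drop start = w[start]'hlt :: w.drop (start + 1) :=
        List.drop_eq_getElem_cons hlt
      by_cases hp : pvPunct.contains (w[start]'hlt)
      · rw [dif_pos ⟨hlt, by rw [hget]; exact hp⟩]
        rw [ih (start + 1) (acc ++ [w[start]!]) (by omega) (by omega)]
        rw [hdrop, List.takeWhile_cons, if_pos hp, hget]
        simp only [Prod.mk.injEq]
        exact ⟨by simp, by simp only [List.length_cons]; omega⟩
      · rw [dif_neg (by rw [hget]; tauto)]
        rw [hdrop, List.takeWhile_cons, if_neg hp]
        simp
    · have hs : start = w.length := by omega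
      rw [dif_neg (by omega)]
      simp [hs]

theorem pvATrail_eq (w : List Char) (start : Nat) (fuel : Nat) :
    ∀ e acc, e ≤ fuel → start ≤ e → e ≤ w.length →
      pvATrail w start e acc =
        (((w.drop start).take (e - start)).rtakeWhile (fun c => pvPunct.contains c) ++ acc,
         start + (((w.drop start).take (e - start)).rdropWhile (fun c => pvPunct.contains c)).length) := by
  induction fuel with
  | zero =>
    intro e acc hf h1 h2
    have he : e = 0 := by omega
    have hs : start = 0 := by omega
    rw [pvATrail]
    simp [he, hs]
  | succ n ih =>
    intro e acc hf h1 h2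
    rw [pvATrail]
    by_cases hlt : start < e
    · have hidx : e - 1 < w.length := by omega
      have hget : w[e-1]! = w[e-1]'hidx := by
        rw [List.getElem!_eq_getElem?_getD]; simp [hidx]
      have h4 : e - 1 - start < (w.drop start).length := by
        simp only [List.length_drop]; omega
      have hval : (w.drop start)[e-1-start]'h4 = w[e-1]'hidx := by
        rw [List.getElem_drop]
        congr 1
        omega
      have hseg : (w.drop start).take (e - start)
          = (w.drop start).take (e - 1 - start) ++ [w[e-1]'hidx] := by
        have h3 : e - start = (e - 1 - start) + 1 := by omega
        rw [h3, List.take_add_one, List.getElem?_eq_getElem h4]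
        rw [hval]
        rfl
      by_cases hp : pvPunct.contains (w[e-1]'hidx)
      · rw [dif_pos ⟨hlt, by rw [hget]; exact hp⟩]
        rw [ih (e-1) (w[e-1]! :: acc) (by omega) (by omega) (by omega)]
        rw [hseg, List.rtakeWhile_concat_pos _ _ _ hp,
            List.rdropWhile_concat_pos _ _ _ hp, hget, List.append_assoc]
        rfl
      · rw [dif_neg (by rw [hget]; tauto)]
        rw [hseg, List.rtakeWhile_concat_neg _ _ _ hp,
            List.rdropWhile_concat_neg _ _ _ hp]
        have hlseg : ((w.drop start).take (e - 1 - start)).length = e - 1 - start := by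
          simp only [List.length_take, List.length_drop]; omega
        refine congrArg₂ Prod.mk ?_ ?_
        · rw [List.nil_append]
        · simp only [List.length_append, List.length_cons, List.length_nil, hlseg]
          omega
    · have he : e = start := by omega
      rw [dif_neg (by omega)]
      simp [he]

-- ===== VERDICT (by name: the statement is the Claim_ definition above) =====
theorem split_punctuation_py_spec : Claim_equal_split_punctuation_py := by
  intro word _
  unfold Spec_split_punctuation_py split_punctuation_py split_punctuation_py_alt
  have hlead : pvALead word.toList 0 [] =
      (word.toList.takeWhile (fun c => pvPunct.contains c),
       (word.toList.takeWhile (fun c => pvPunct.contains c)).length) := by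
    have h := pvALead_eq word.toList word.toList.length 0 [] (by omega) (by omega)
    simp only [List.drop_zero, List.nil_append, Nat.zero_add] at h
    exact h
  have hstle : (word.toList.takeWhile (fun c => pvPunct.contains c)).length ≤ word.toList.length :=
    (List.takeWhile_prefix _).length_le
  have hdropstart : word.toList.drop (word.toList.takeWhile (fun c => pvPunct.contains c)).length
      = word.toList.dropWhile (fun c => pvPunct.contains c) := by
    generalize hk : (word.toList.takeWhile (fun c => pvPunct.contains c)).length = k
    conv_lhs => rw [← List.takeWhile_append_dropWhile
      (p := fun c => pvPunct.contains c) (l := word.toList)]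
    rw [← hk, List.drop_left]
  have hsum : (word.toList.takeWhile (fun c => pvPunct.contains c)).length
      + (word.toList.dropWhile (fun c => pvPunct.contains c)).length = word.toList.length := by
    conv_rhs => rw [← List.takeWhile_append_dropWhile
      (p := fun c => pvPunct.contains c) (l := word.toList)]
    rw [List.length_append]
  have htake : (word.toList.drop (word.toList.takeWhile (fun c => pvPunct.contains c)).length).take
        (word.toList.length - (word.toList.takeWhile (fun c => pvPunct.contains c)).length)
      = word.toList.dropWhile (fun c => pvPunct.contains c) := by
    rw [hdropstart]
    apply List.take_of_length_le
    omega
  have htrail : pvATrail word.toList (word.toList.takeWhile (fun c => pvPunct.contains c)).length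
        word.toList.length [] =
      ((word.toList.dropWhile (fun c => pvPunct.contains c)).rtakeWhile (fun c => pvPunct.contains c),
       (word.toList.takeWhile (fun c => pvPunct.contains c)).length +
         ((word.toList.dropWhile (fun c => pvPunct.contains c)).rdropWhile (fun c => pvPunct.contains c)).length) := by
    have h := pvATrail_eq word.toList (word.toList.takeWhile (fun c => pvPunct.contains c)).length
      word.toList.length word.toList.length [] (by omega) hstle (by omega)
    rw [htake] at h
    simpa using h
  simp only [hlead, htrail]
  refine congrArg₂ Prod.mk ?_ (congrArg₂ Prod.mk ?_ ?_)
  · -- leading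
    congr 1
    have hlen : word.toList.length - (word.toList.dropWhile (fun c => pvPunct.contains c)).length
        = (word.toList.takeWhile (fun c => pvPunct.contains c)).length := by omega
    rw [hlen]
    exact List.prefix_iff_eq_take.mp (List.takeWhile_prefix _)
  · -- core
    congr 1
    rw [List.drop_take]
    rw [hdropstart]
    have h1 : (word.toList.takeWhile (fun c => pvPunct.contains c)).length +
        ((word.toList.dropWhile (fun c => pvPunct.contains c)).rdropWhile (fun c => pvPunct.contains c)).length
        - (word.toList.takeWhile (fun c => pvPunct.contains c)).length
        = ((word.toList.dropWhile (fun c => pvPunct.contains c)).rdropWhile (fun c => pvPunct.contains c)).length := by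
      omega
    rw [h1]
    exact (List.prefix_iff_eq_take.mp (List.rdropWhile_prefix _ _)).symm
  · -- trailing
    congr 1
    generalize hk : ((word.toList.dropWhile (fun c => pvPunct.contains c)).rdropWhile
      (fun c => pvPunct.contains c)).length = k
    conv_rhs => rw [← List.rdropWhile_append_rtakeWhile
      (p := fun c => pvPunct.contains c) (l := word.toList.dropWhile (fun c => pvPunct.contains c))]
    rw [← hk, List.drop_left]
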